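-- pv_equiv track=rewrite | github.com/raviiprakash6/DS | venv/DataStructure/Array/equalSumOfEvenOddSubarray.py | countSubarraySum
-- ===== SOURCE A (Python) =====
-- def countSubarraySum(arr):
--     count = 0
--     n = len(arr)
--     for i in range(n):
--         sumEven = 0
--         sumOdd = 0
--         for j in range(i, n):
--             if (j % 2 == 0):
--                 sumEven += arr[j]
--             else:
--                 sumOdd += arr[j]
--             if (sumEven == sumOdd):
--                 count += 1
--
--     return count
-- ===== SOURCE B (Python) =====
-- def countSubarraySum(arr):
--     # O(n): signed prefix sums; a subarray [i..j] has equal even/odd-index sums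
--     # iff the signed prefix repeats; count equal-prefix pairs with a hashmap.
--     count = 0
--     prefix = 0
--     seen = {0: 1}
--     for j, x in enumerate(arr):
--         prefix += x if j % 2 == 0 else -x
--         c = seen.get(prefix, 0)
--         count += c
--         seen[prefix] = c + 1
--     return count
-- ===== Notes on version B (the rewrite author's own statement) =====
-- stated objective: faster
-- what changed: Replaced A's quadratic double loop (re-accumulating even/odd sums for every start index) by a single pass over signed prefix sums with a hashmap counting repeated prefixes, so the inner scan disappears.
import Mathlib
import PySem

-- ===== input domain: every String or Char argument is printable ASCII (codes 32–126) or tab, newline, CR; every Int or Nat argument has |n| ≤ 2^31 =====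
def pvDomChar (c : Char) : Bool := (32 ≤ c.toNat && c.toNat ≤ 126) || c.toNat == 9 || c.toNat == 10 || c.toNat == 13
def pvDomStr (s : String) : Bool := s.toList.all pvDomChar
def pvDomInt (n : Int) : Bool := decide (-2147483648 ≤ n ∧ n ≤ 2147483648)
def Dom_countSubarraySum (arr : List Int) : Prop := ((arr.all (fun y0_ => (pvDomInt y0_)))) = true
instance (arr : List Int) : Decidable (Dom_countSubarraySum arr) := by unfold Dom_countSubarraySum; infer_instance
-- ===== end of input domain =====

-- B replaces A's O(n^2) double loop by a single pass over signed prefix sums with a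
-- hashmap counting repeated prefixes (asymptotically faster); return values are equal.

-- ===== PORT A =====
-- inner-loop body of A: update sumEven/sumOdd by global parity of j, then count equality
def stepA (arr : List Int) (s : Int × Int × Int) (j : Int) : Int × Int × Int :=
  if PySem.Int.mod j 2 == 0 then
    let sE := s.1 + PySem.List.pyGetD arr j 0
    (sE, s.2.1, if sE == s.2.1 then s.2.2 + 1 else s.2.2)
  else
    let sO := s.2.1 + PySem.List.pyGetD arr j 0
    (s.1, sO, if s.1 == sO then s.2.2 + 1 else s.2.2)

def countSubarraySum (arr : List Int) : Int :=
  let n : Int := arr.length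
  (PySem.List.pyRange 0 n 1).foldl
    (fun count i => ((PySem.List.pyRange i n 1).foldl (stepA arr) (0, 0, count)).2.2) 0

-- ===== PORT B =====
-- loop body of B: extend the signed prefix sum, add the number of equal earlier prefixes,
-- record the new prefix in the dict (state = (count, prefix, seen))
def stepB (st : Int × Int × PySem.Dict Int Int) (jx : Int × Int) : Int × Int × PySem.Dict Int Int :=
  let pfx := st.2.1 + (if PySem.Int.mod jx.1 2 == 0 then jx.2 else -jx.2)
  let c := (st.2.2).getD pfx 0
  (st.1 + c, pfx, (st.2.2).insert pfx (c + 1))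

def countSubarraySum_alt (arr : List Int) : Int :=
  ((PySem.List.enumerate arr 0).foldl stepB
    (0, 0, PySem.Dict.ofList [((0 : Int), (1 : Int))])).1

-- ===== PRECONDITION & SPEC =====
def Spec_countSubarraySum (arr : List Int) (out : Int) : Prop := out = countSubarraySum_alt arr
instance (arr : List Int) (out : Int) : Decidable (Spec_countSubarraySum arr out) := by unfold Spec_countSubarraySum; infer_instance

-- ===== CLAIM (what is proved, stated in full; the proofs are below) =====
def Claim_equal_countSubarraySum : Prop := ∀ (arr : List Int), Dom_countSubarraySum arr → Spec_countSubarraySum arr (countSubarraySum arr)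

-- ===== LEMMAS AND PROOFS =====

-- signed prefix sum P k = sum_{t<k} (-1)^t * arr[t]
def Pf (arr : List Int) : Nat → Int
  | 0 => 0
  | k + 1 => Pf arr k + (if k % 2 == 0 then arr.getD k 0 else -(arr.getD k 0))

-- for each element, the number of equal elements occurring later in the list
def latersum : List Int → Nat
  | [] => 0
  | x :: r => r.count x + latersum r

-- scanning count of pairs: seen-so-far accumulator
def earlysum (seen : List Int) : List Int → Nat
  | [] => 0
  | x :: r => seen.count x + earlysum (x :: seen) r

theorem sum_count_singleton (t : List Int) (x : Int) :
    (t.map (fun y => [x].count y)).sum = t.count x := by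
  induction t with
  | nil => simp
  | cons z t iht =>
    simp only [List.map_cons, List.sum_cons]
    rw [iht]
    by_cases h : z = x
    · subst h; simp; omega
    · have h1 : (x == z) = false := by simp; exact fun e => h e.symm
      have h2 : (z == x) = false := by simp [h]
      simp [List.count_cons, h1, h2]

theorem sum_count_cons (t : List Int) (x : Int) (seen : List Int) :
    (t.map (fun y => (x :: seen).count y)).sum
      = (t.map (fun y => [x].count y)).sum + (t.map (fun y => seen.count y)).sum := by
  induction t with
  | nil => simp
  | cons z t iht =>
    simp only [List.map_cons, List.sum_cons]
    rw [iht]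
    simp [List.count_cons]
    omega

theorem early_shift (l : List Int) : ∀ seen : List Int,
    earlysum seen l = earlysum [] l + (l.map (fun y => seen.count y)).sum := by
  induction l with
  | nil => intro seen; simp [earlysum]
  | cons x r ih =>
    intro seen
    simp only [earlysum, List.map_cons, List.sum_cons]
    rw [ih (x :: seen), ih [x], sum_count_cons]
    simp
    omega

theorem early_eq_later (l : List Int) : earlysum [] l = latersum l := by
  induction l with
  | nil => rfl
  | cons x r ih =>
    simp only [earlysum, latersum]
    rw [early_shift r [x], ih, sum_count_singleton]
    simp
    omega

theorem lemA_inner (arr : List Int) : ∀ (m a : Nat) (e o c : Int), a + m = arr.length →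
    (((PySem.List.pyRange (a : Int) (arr.length : Int) 1).foldl (stepA arr) (e, o, c)).2.2
      = c + (((List.range' (a + 1) m).countP (fun q => e - o + Pf arr q - Pf arr a == 0)) : Int)) := by
  intro m
  induction m with
  | zero =>
    intro a e o c h
    rw [PySem.List.pyRange_one_eq_nil (by exact_mod_cast Nat.le_of_eq h.symm)]
    simp
  | succ m ih =>
    intro a e o c h
    have hlt : (a : Int) < (arr.length : Int) := by exact_mod_cast (by omega : a < arr.length)
    rw [PySem.List.pyRange_one_cons hlt]
    simp only [List.foldl_cons]
    have hmod : PySem.Int.mod (a : Int) 2 = ((a % 2 : Nat) : Int) := by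
      exact_mod_cast PySem.Int.mod_natCast a 2
    have hget : PySem.List.pyGetD arr (a : Int) 0 = arr.getD a 0 := PySem.List.pyGetD_natCast arr a 0
    have hca : ((a : Int) + 1) = ((a + 1 : Nat) : Int) := by push_cast; ring
    have hPf : Pf arr (a + 1) = Pf arr a + (if a % 2 == 0 then arr.getD a 0 else -(arr.getD a 0)) := rfl
    generalize hx : arr.getD a 0 = x at hget hPf
    by_cases hp : a % 2 = 0
    · have hpe : (PySem.Int.mod (a : Int) 2 == 0) = true := by rw [hmod, hp]; simp
      have hPf' : Pf arr (a + 1) = Pf arr a + x := by rw [hPf]; simp [hp]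
      have hs : stepA arr (e, o, c) (a : Int)
          = (e + x, o, if e + x == o then c + 1 else c) := by
        simp only [stepA, hpe, if_true, hget]
      rw [hs, hca, ih (a + 1) _ _ _ (by omega)]
      have hcong : (List.range' (a + 1 + 1) m).countP
            (fun q => e + x - o + Pf arr q - Pf arr (a + 1) == 0)
          = (List.range' (a + 1 + 1) m).countP (fun q => e - o + Pf arr q - Pf arr a == 0) := by
        apply List.countP_congr
        intro q _
        rw [hPf']
        simp only [beq_iff_eq]
        omega
      rw [hcong, List.range'_succ, List.countP_cons]
      by_cases hq : e + x = o
      · have hqb : (e + x == o) = true := by simp [hq]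
        have hc1 : (e - o + Pf arr (a + 1) - Pf arr a == 0) = true := by
          simp [hPf']; omega
        rw [hqb, hc1]
        simp
        omega
      · have hqb : (e + x == o) = false := by simp [hq]
        have hc1 : (e - o + Pf arr (a + 1) - Pf arr a == 0) = false := by
          simp [hPf']; omega
        rw [hqb, hc1]
        simp
    · have hpe : (PySem.Int.mod (a : Int) 2 == 0) = false := by
        rw [hmod]; simp; omega
      have hPf' : Pf arr (a + 1) = Pf arr a - x := by rw [hPf]; simp [hp]; ring
      have hs : stepA arr (e, o, c) (a : Int)
          = (e, o + x, if e == o + x then c + 1 else c) := by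
        simp only [stepA, hpe, Bool.false_eq_true, if_false, hget]
      rw [hs, hca, ih (a + 1) _ _ _ (by omega)]
      have hcong : (List.range' (a + 1 + 1) m).countP
            (fun q => e - (o + x) + Pf arr q - Pf arr (a + 1) == 0)
          = (List.range' (a + 1 + 1) m).countP (fun q => e - o + Pf arr q - Pf arr a == 0) := by
        apply List.countP_congr
        intro q _
        rw [hPf']
        simp only [beq_iff_eq]
        omega
      rw [hcong, List.range'_succ, List.countP_cons]
      by_cases hq : e = o + x
      · have hqb : (e == o + x) = true := by simp [hq]
        have hc1 : (e - o + Pf arr (a + 1) - Pf arr a == 0) = true := by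
          simp [hPf']; omega
        rw [hqb, hc1]
        simp
        omega
      · have hqb : (e == o + x) = false := by simp [hq]
        have hc1 : (e - o + Pf arr (a + 1) - Pf arr a == 0) = false := by
          simp [hPf']; omega
        rw [hqb, hc1]
        simp


theorem lemA_outer (arr : List Int) : ∀ (m a : Nat) (c : Int), a + m = arr.length →
    ((PySem.List.pyRange (a : Int) (arr.length : Int) 1).foldl
        (fun count i => ((PySem.List.pyRange i (arr.length : Int) 1).foldl (stepA arr) (0, 0, count)).2.2) c)
      = c + (latersum ((List.range' a (m + 1)).map (Pf arr)) : Int) := by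
  intro m
  induction m with
  | zero =>
    intro a c h
    rw [PySem.List.pyRange_one_eq_nil (by exact_mod_cast Nat.le_of_eq h.symm)]
    simp [latersum]
  | succ m ih =>
    intro a c h
    have hlt : (a : Int) < (arr.length : Int) := by exact_mod_cast (by omega : a < arr.length)
    rw [PySem.List.pyRange_one_cons hlt]
    simp only [List.foldl_cons]
    have hca : ((a : Int) + 1) = ((a + 1 : Nat) : Int) := by push_cast; ring
    rw [lemA_inner arr (m + 1) a 0 0 c (by omega), hca, ih (a + 1) _ (by omega)]
    -- latersum of the cons
    have hls : latersum ((List.range' a (m + 1 + 1)).map (Pf arr))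
        = ((List.range' (a + 1) (m + 1)).map (Pf arr)).count (Pf arr a)
          + latersum ((List.range' (a + 1) (m + 1)).map (Pf arr)) := by
      rw [List.range'_succ, List.map_cons]
      rfl
    rw [hls]
    have hcnt : ((List.range' (a + 1) (m + 1)).map (Pf arr)).count (Pf arr a)
        = (List.range' (a + 1) (m + 1)).countP (fun q => 0 - 0 + Pf arr q - Pf arr a == 0) := by
      rw [List.count, List.countP_map]
      apply List.countP_congr
      intro q _
      simp only [Function.comp_apply, beq_iff_eq]
      omega
    rw [← hcnt] at *
    push_cast
    omega



theorem lemB (arr : List Int) : ∀ (m a : Nat) (cnt : Int) (d : PySem.Dict Int Int) (sl : List Int),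
    a + m = arr.length →
    (∀ v : Int, d.getD v 0 = (sl.count v : Int)) →
    ((PySem.List.enumerate (arr.drop a) (a : Int)).foldl stepB (cnt, Pf arr a, d)).1
      = cnt + ((earlysum sl ((List.range' (a + 1) m).map (Pf arr))) : Int) := by
  intro m
  induction m with
  | zero =>
    intro a cnt d sl h hinv
    rw [List.drop_of_length_le (by omega)]
    simp [PySem.List.enumerate, earlysum]
  | succ m ih =>
    intro a cnt d sl h hinv
    have ha : a < arr.length := by omega
    rw [List.drop_eq_getElem_cons ha, PySem.List.enumerate_cons]
    simp only [List.foldl_cons]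
    have hmod : PySem.Int.mod (a : Int) 2 = ((a % 2 : Nat) : Int) := by
      exact_mod_cast PySem.Int.mod_natCast a 2
    have hPf : Pf arr (a + 1) = Pf arr a + (if PySem.Int.mod (a : Int) 2 == 0 then arr[a] else -arr[a]) := by
      show Pf arr a + _ = _
      congr 1
      rw [hmod]
      by_cases hp : a % 2 = 0
      · simp [hp, List.getD_eq_getElem?_getD, ha]
      · have : ¬ (((a % 2 : Nat) : Int) == 0) = true := by simp; omega
        have h2 : ¬ (a % 2 == 0) = true := by simp; omega
        simp only [if_neg this, if_neg h2]
        rw [List.getD_eq_getElem?_getD]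
        simp [ha]
    have hstep : stepB (cnt, Pf arr a, d) ((a : Int), arr[a])
        = (cnt + (sl.count (Pf arr (a + 1)) : Int), Pf arr (a + 1),
            d.insert (Pf arr (a + 1)) ((sl.count (Pf arr (a + 1)) : Int) + 1)) := by
      simp only [stepB, ← hPf, hinv]
    rw [hstep]
    have hca : ((a : Int) + 1) = ((a + 1 : Nat) : Int) := by push_cast; ring
    rw [hca, ih (a + 1) _ _ (Pf arr (a + 1) :: sl) (by omega) ?_]
    · rw [List.range'_succ, List.map_cons]
      show _ = cnt + ((sl.count (Pf arr (a + 1)) + earlysum (Pf arr (a + 1) :: sl) ((List.range' (a + 1 + 1) m).map (Pf arr)) : Nat) : Int)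
      push_cast
      ring
    · intro v
      rw [PySem.Dict.getD_insert]
      by_cases hv : v = Pf arr (a + 1)
      · subst hv
        simp
      · rw [if_neg hv, hinv v, List.count_cons]
        simp
        exact fun e => hv e.symm

theorem ports_agree (arr : List Int) : countSubarraySum arr = countSubarraySum_alt arr := by
  have hA : countSubarraySum arr
      = 0 + (latersum ((List.range' 0 (arr.length + 1)).map (Pf arr)) : Int) := by
    have := lemA_outer arr arr.length 0 0 (by omega)
    simpa [countSubarraySum] using this
  have hinv : ∀ v : Int, (PySem.Dict.ofList [((0 : Int), (1 : Int))]).getD v 0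
      = (([(0 : Int)].count v : Nat) : Int) := by
    intro v
    by_cases hv : v = 0
    · subst hv; rfl
    · have h0 : ((0 : Int) == v) = false := by simp; exact fun e => hv e.symm
      have hv0 : (v == (0 : Int)) = false := by simp [hv]
      show (PySem.Dict.mk [((0 : Int), (1 : Int))]).getD v 0 = _
      rw [PySem.Dict.getD_eq_get?_getD, PySem.Dict.get?_mk_cons]
      have hnil : (PySem.Dict.mk ([] : List (Int × Int))).get? v = none := rfl
      simp [h0, hnil, List.count_singleton]
  have hB : countSubarraySum_alt arr
      = 0 + ((earlysum [(0 : Int)] ((List.range' 1 arr.length).map (Pf arr))) : Nat) := by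
    have := lemB arr arr.length 0 0 (PySem.Dict.ofList [((0 : Int), (1 : Int))]) [(0 : Int)]
      (by omega) hinv
    simp only [Nat.cast_zero, List.drop_zero] at this
    have hPf0 : Pf arr 0 = 0 := rfl
    rw [hPf0] at this
    simpa [countSubarraySum_alt] using this
  rw [hA, hB]
  have hsplit : (List.range' 0 (arr.length + 1)).map (Pf arr)
      = (0 : Int) :: (List.range' 1 arr.length).map (Pf arr) := by
    rw [List.range'_succ, List.map_cons]
    rfl
  rw [← early_eq_later, hsplit]
  simp [earlysum]

-- ===== VERDICT (by name: the statement is the Claim_ definition above) =====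
theorem countSubarraySum_spec : Claim_equal_countSubarraySum := by
  intro arr _
  unfold Spec_countSubarraySum
  exact ports_agree arr
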